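-- pv_equiv track=rewrite | github.com/Liquilab/Bottie | research/build_decision_table.py | group_tokens_by_event
-- ===== SOURCE A (Python) =====
-- def group_tokens_by_event(index: list[dict]) -> dict[str, list[dict]]:
--     """Group tokens by event (slug base without outcome suffix)."""
--     events = {}
--     for t in index:
--         slug = t.get("slug", "")
--         # Extract base event slug: strip outcome suffix
--         # e.g. "ucl-fcb1-new-2026-03-18-fcb1" → "ucl-fcb1-new-2026-03-18"
--         # e.g. "ucl-fcb1-new-2026-03-18-draw" → "ucl-fcb1-new-2026-03-18"
--         condition_id = t.get("condition_id", "")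
--
--         # Use condition_id grouping: same condition = same game leg
--         # But we want to group by EVENT (all legs of one game)
--         # Best heuristic: strip last segment of slug that's an outcome
--         parts = slug.rsplit("-", 1)
--         if len(parts) == 2 and parts[1] in ("draw", "fcb1", "new", "tot", "atm1",
--                                                "bay1", "ata1", "liv1", "gal", "spread",
--                                                "total", "btts", "home", "away"):
--             base = parts[0]
--         else:
--             # Try stripping known suffixes more aggressively
--             base = slug
--
--         # Alternative: group by end_date + first N chars of slug
--         end_date = t.get("end_date", "")[:10]
--         slug_prefix = slug[:30] if slug else ""
--         event_key = f"{end_date}_{slug_prefix}" if end_date else slug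
--
--         if event_key not in events:
--             events[event_key] = []
--         events[event_key].append(t)
--
--     return events
-- ===== SOURCE B (Python) =====
-- def _event_key(t: dict) -> str:
--     slug = t.get("slug", "")
--     end_date = t.get("end_date", "")[:10]
--     slug_prefix = slug[:30] if slug else ""
--     return f"{end_date}_{slug_prefix}" if end_date else slug
--
--
-- def group_tokens_by_event(index: list[dict]) -> dict[str, list[dict]]:
--     """Group tokens by event: key each token once, dedup the keys in first-seen
--     order, then collect each group by filtering the keyed pairs."""
--     pairs = [(_event_key(t), t) for t in index]
--     return {k: [t for k2, t in pairs if k2 == k]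
--             for k in dict.fromkeys(k for k, _ in pairs)}
-- ===== Notes on version B (the rewrite author's own statement) =====
-- stated objective: alternative
-- what changed: Replaces A's incremental dict-building loop (membership test, seed empty list, append) with a key-then-group pipeline: compute each token's event key once, dedup the keys in first-seen order, and build each group by filtering the keyed pairs; the dead base/condition_id/rsplit computation is dropped.
import Mathlib
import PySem

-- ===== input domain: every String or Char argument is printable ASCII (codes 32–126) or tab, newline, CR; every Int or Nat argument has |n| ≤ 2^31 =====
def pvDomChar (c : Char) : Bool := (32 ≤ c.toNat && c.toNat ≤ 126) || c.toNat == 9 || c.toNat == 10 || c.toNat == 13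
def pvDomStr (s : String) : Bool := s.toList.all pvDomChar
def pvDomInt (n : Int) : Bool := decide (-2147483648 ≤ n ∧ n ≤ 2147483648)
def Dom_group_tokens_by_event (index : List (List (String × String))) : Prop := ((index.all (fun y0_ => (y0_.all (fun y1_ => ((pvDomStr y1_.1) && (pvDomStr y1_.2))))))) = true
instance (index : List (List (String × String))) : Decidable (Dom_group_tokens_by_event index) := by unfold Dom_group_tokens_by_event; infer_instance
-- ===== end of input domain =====

-- B groups by keying every token once, deduping the keys in first-seen order and
-- filtering the keyed pairs per key, instead of A's incremental dict-append loop
-- (objective: alternative; same results, same key order).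

-- ===== PORT A =====
-- outcome-suffix list of A (the `parts[1] in (...)` tuple; the computed `base` is unused)
def pvSuffixes_group_tokens_by_event : List String :=
  ["draw", "fcb1", "new", "tot", "atm1", "bay1", "ata1", "liv1", "gal", "spread",
   "total", "btts", "home", "away"]

def group_tokens_by_event (index : List (List (String × String))) : List (String × List (List (String × String))) :=
  (index.foldl (fun events t =>
    let td := PySem.Dict.mk t
    let slug := td.getD "slug" ""
    let _condition_id := td.getD "condition_id" ""
    -- slug.rsplit("-", 1) ported by hand via rfind (exact: splits at the last '-', if any)
    let i := PySem.Str.rfind slug "-"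
    let parts := if i = -1 then [slug]
                 else [PySem.Str.slice slug none (some i), PySem.Str.slice slug (some (i + 1)) none]
    let _base := if parts.length = 2 ∧ (PySem.List.pyGetD parts 1 "") ∈ pvSuffixes_group_tokens_by_event
                 then PySem.List.pyGetD parts 0 "" else slug
    let end_date := PySem.Str.slice (td.getD "end_date" "") none (some 10)
    let slug_prefix := if slug ≠ "" then PySem.Str.slice slug none (some 30) else ""
    let event_key := if end_date ≠ "" then PySem.Str.join "" [end_date, "_", slug_prefix] else slug
    let events := if events.contains event_key then events else events.insert event_key []
    events.modify event_key [] (fun l => l ++ [t]))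
   PySem.Dict.empty).items

-- ===== PORT B =====
def pvEventKey_group_tokens_by_event (t : List (String × String)) : String :=
  let td := PySem.Dict.mk t
  let slug := td.getD "slug" ""
  let end_date := PySem.Str.slice (td.getD "end_date" "") none (some 10)
  let slug_prefix := if slug ≠ "" then PySem.Str.slice slug none (some 30) else ""
  if end_date ≠ "" then PySem.Str.join "" [end_date, "_", slug_prefix] else slug

def group_tokens_by_event_alt (index : List (List (String × String))) : List (String × List (List (String × String))) :=
  let pairs := index.map (fun t => (pvEventKey_group_tokens_by_event t, t))
  (PySem.List.dedup (pairs.map (fun p => p.1))).map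
    (fun k => (k, (pairs.filter (fun p => p.1 == k)).map (fun p => p.2)))

-- ===== PRECONDITION & SPEC =====
def Spec_group_tokens_by_event (index : List (List (String × String))) (out : List (String × List (List (String × String)))) : Prop := out = group_tokens_by_event_alt index
instance (index : List (List (String × String))) (out : List (String × List (List (String × String)))) : Decidable (Spec_group_tokens_by_event index out) := by unfold Spec_group_tokens_by_event; infer_instance

-- ===== CLAIM (what is proved, stated in full; the proofs are below) =====
def Claim_equal_group_tokens_by_event : Prop := ∀ (index : List (List (String × String))), Dom_group_tokens_by_event index → Spec_group_tokens_by_event index (group_tokens_by_event index)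

-- ===== LEMMAS AND PROOFS =====

-- A's guarded "ensure key, then append" step is one `modify` with default [].
theorem pv_step_eq_modify (d : PySem.Dict String (List (List (String × String))))
    (k : String) (t : List (String × String)) :
    (if d.contains k then d else d.insert k []).modify k [] (fun l => l ++ [t])
      = d.modify k [] (fun l => l ++ [t]) := by
  by_cases h : d.contains k = true
  · simp [h]
  · simp [h, PySem.Dict.modify, PySem.Dict.getD_insert_self,
      PySem.Dict.insert_insert_self, PySem.Dict.getD_of_not_contains]

-- ===== VERDICT (by name: the statement is the Claim_ definition above) =====
theorem group_tokens_by_event_spec : Claim_equal_group_tokens_by_event := by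
  intro index _
  unfold Spec_group_tokens_by_event group_tokens_by_event group_tokens_by_event_alt
  -- A's loop step, after dropping the dead `base` computation (a reduced `let`),
  -- is the single-`modify` step keyed by pvEventKey_group_tokens_by_event
  have hf : index.foldl (fun events t =>
      let td := PySem.Dict.mk t
      let slug := td.getD "slug" ""
      let _condition_id := td.getD "condition_id" ""
      let i := PySem.Str.rfind slug "-"
      let parts := if i = -1 then [slug]
                   else [PySem.Str.slice slug none (some i), PySem.Str.slice slug (some (i + 1)) none]
      let _base := if parts.length = 2 ∧ (PySem.List.pyGetD parts 1 "") ∈ pvSuffixes_group_tokens_by_event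
                   then PySem.List.pyGetD parts 0 "" else slug
      let end_date := PySem.Str.slice (td.getD "end_date" "") none (some 10)
      let slug_prefix := if slug ≠ "" then PySem.Str.slice slug none (some 30) else ""
      let event_key := if end_date ≠ "" then PySem.Str.join "" [end_date, "_", slug_prefix] else slug
      let events := if events.contains event_key then events else events.insert event_key []
      events.modify event_key [] (fun l => l ++ [t])) PySem.Dict.empty
      = (index.map (fun t => (pvEventKey_group_tokens_by_event t, t))).foldl
          (fun d p => d.modify p.1 [] (fun l => l ++ [p.2])) PySem.Dict.empty := by
    rw [List.foldl_map]
    congr 1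
    funext d t
    exact pv_step_eq_modify d (pvEventKey_group_tokens_by_event t) t
  rw [hf]
  set pairs := index.map (fun t => (pvEventKey_group_tokens_by_event t, t)) with hp
  have hnd : (pairs.foldl (fun d p => d.modify p.1 [] (fun l => l ++ [p.2])) PySem.Dict.empty).keys.Nodup := by
    exact PySem.Dict.nodup_keys_foldl_modify_key pairs (fun p => p.1) [] (fun d p l => l ++ [p.2]) PySem.Dict.empty (by simp)
  rw [PySem.Dict.items_eq_map_keys _ hnd []]
  have hkeys : (pairs.foldl (fun d p => d.modify p.1 [] (fun l => l ++ [p.2])) PySem.Dict.empty).keys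
      = PySem.List.dedup (pairs.map (fun p => p.1)) := by
    rw [PySem.Dict.keys_foldl_modify_key]
    simp [PySem.Dict.keys_empty, PySem.Set.update, PySem.Set.ofList_eq_foldl]
  rw [hkeys]
  apply List.map_congr_left
  intro k _
  rw [PySem.Dict.getD_foldl_modify_append]
  simp [PySem.Dict.getD_empty]
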